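-- pv_equiv track=rewrite | github.com/VIROHuman/reserch_paper_agent-1 | server/src/utils/validation_service.py | needs_validation
-- ===== SOURCE A (Python) =====
-- from typing import List, Dict, Any, AsyncGenerator
--
-- def needs_validation(reference: Dict[str, Any]) -> bool:
--     """
--     Determine if a reference needs validation/enrichment
--     """
--     # Check if critical fields are missing
--     critical_fields = ["doi", "abstract", "url"]
--     missing_critical = sum(1 for field in critical_fields if not reference.get(field))
--
--     # If missing 2+ critical fields, definitely needs validation
--     if missing_critical >= 2:
--         return True
--
--     # If missing DOI or abstract, likely needs validation
--     if not reference.get("doi") or not reference.get("abstract"):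
--         return True
--
--     return False
-- ===== SOURCE B (Python) =====
-- def needs_validation(reference: dict) -> bool:
--     # Simpler: only doi and abstract matter; if 2+ of the three fields are
--     # missing then doi or abstract is among them, and url alone never triggers.
--     return not reference.get("doi") or not reference.get("abstract")
-- ===== Notes on version B (the rewrite author's own statement) =====
-- stated objective: simpler
-- what changed: Replaces the counting loop over three fields and its two-branch test with one closed-form boolean on the doi and abstract lookups, since missing_critical >= 2 always implies doi or abstract is missing and url alone never matters.
import Mathlib
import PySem

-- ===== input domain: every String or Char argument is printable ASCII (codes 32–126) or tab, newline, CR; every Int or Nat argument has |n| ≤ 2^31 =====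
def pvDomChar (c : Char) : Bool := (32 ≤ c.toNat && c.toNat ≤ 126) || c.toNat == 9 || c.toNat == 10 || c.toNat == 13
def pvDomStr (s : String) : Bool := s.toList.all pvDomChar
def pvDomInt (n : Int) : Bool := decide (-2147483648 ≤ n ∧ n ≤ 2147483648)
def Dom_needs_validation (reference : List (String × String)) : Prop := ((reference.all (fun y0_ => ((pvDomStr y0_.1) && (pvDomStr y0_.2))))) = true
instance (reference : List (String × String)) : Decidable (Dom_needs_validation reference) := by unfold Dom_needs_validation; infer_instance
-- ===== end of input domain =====

-- B replaces A's counting loop and two branches by one closed-form boolean on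
-- the doi/abstract lookups (url is provably irrelevant); objective: simpler.

-- `not reference.get(f)`: missing key or empty-string value is falsy
def pvMissing (reference : List (String × String)) (f : String) : Bool :=
  match (PySem.Dict.ofList reference).get? f with
  | none => true
  | some s => s == ""

-- ===== PORT A =====
def needs_validation (reference : List (String × String)) : Bool :=
  let critical_fields := ["doi", "abstract", "url"]
  let missing_critical := (critical_fields.filter (fun f => pvMissing reference f)).length
  if missing_critical ≥ 2 then true
  else if pvMissing reference "doi" || pvMissing reference "abstract" then true
  else false

-- ===== PORT B =====
def needs_validation_alt (reference : List (String × String)) : Bool :=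
  pvMissing reference "doi" || pvMissing reference "abstract"

-- ===== PRECONDITION & SPEC =====
def Spec_needs_validation (reference : List (String × String)) (out : Bool) : Prop := out = needs_validation_alt reference
instance (reference : List (String × String)) (out : Bool) : Decidable (Spec_needs_validation reference out) := by unfold Spec_needs_validation; infer_instance

-- ===== CLAIM (what is proved, stated in full; the proofs are below) =====
def Claim_equal_needs_validation : Prop := ∀ (reference : List (String × String)), Dom_needs_validation reference → Spec_needs_validation reference (needs_validation reference)

-- ===== LEMMAS AND PROOFS =====

-- ===== VERDICT (by name: the statement is the Claim_ definition above) =====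
theorem needs_validation_spec : Claim_equal_needs_validation := by
  intro reference _
  unfold Spec_needs_validation needs_validation needs_validation_alt
  cases hd : pvMissing reference "doi" <;>
    cases ha : pvMissing reference "abstract" <;>
      cases hu : pvMissing reference "url" <;>
        simp [List.filter, hd, ha, hu]
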